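-- pv_equiv track=rewrite | github.com/fsv-unterjesingen/fsv-unterjesingen.github.io | scripts/import_wordpress_media.py | decode_mysql_string
-- ===== SOURCE A (Python) =====
-- def decode_mysql_string(value: str) -> str:
--     result: list[str] = []
--     i = 0
--     while i < len(value):
--         char = value[i]
--         if char != "\\":
--             result.append(char)
--             i += 1
--             continue
--
--         i += 1
--         if i >= len(value):
--             result.append("\\")
--             break
--
--         escaped = value[i]
--         result.append(
--             {
--                 "0": "\0",
--                 "b": "\b",
--                 "n": "\n",
--                 "r": "\r",
--                 "t": "\t",
--                 "Z": "\x1a",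
--                 "\\": "\\",
--                 "'": "'",
--                 '"': '"',
--             }.get(escaped, escaped)
--         )
--         i += 1
--
--     return "".join(result)
-- ===== SOURCE B (Python) =====
-- _MYSQL_ESCAPES = {
--     "0": "\0",
--     "b": "\b",
--     "n": "\n",
--     "r": "\r",
--     "t": "\t",
--     "Z": "\x1a",
--     "\\": "\\",
--     "'": "'",
--     '"': '"',
-- }
--
--
-- def decode_mysql_string(value: str) -> str:
--     # Split on the escape introducer; the first piece is literal text, and each
--     # later piece starts with the character that was escaped (an empty piece
--     # means the escaped character was the backslash delimiting the next piece,
--     # or a lone trailing backslash at the end of the string).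
--     parts = value.split("\\")
--     out = [parts[0]]
--     n = len(parts)
--     i = 1
--     while i < n:
--         p = parts[i]
--         if p != "":
--             out.append(_MYSQL_ESCAPES.get(p[0], p[0]) + p[1:])
--             i += 1
--         else:
--             out.append("\\" + (parts[i + 1] if i + 1 < n else ""))
--             i += 2
--     return "".join(out)
-- ===== Notes on version B (the rewrite author's own statement) =====
-- stated objective: faster
-- what changed: B replaces A's manual index-based while loop over characters with a split on the backslash delimiter followed by a reassembly pass over the resulting segments (decoding only the first character of each segment); the per-character work moves into str.split/str.join.
import Mathlib
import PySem

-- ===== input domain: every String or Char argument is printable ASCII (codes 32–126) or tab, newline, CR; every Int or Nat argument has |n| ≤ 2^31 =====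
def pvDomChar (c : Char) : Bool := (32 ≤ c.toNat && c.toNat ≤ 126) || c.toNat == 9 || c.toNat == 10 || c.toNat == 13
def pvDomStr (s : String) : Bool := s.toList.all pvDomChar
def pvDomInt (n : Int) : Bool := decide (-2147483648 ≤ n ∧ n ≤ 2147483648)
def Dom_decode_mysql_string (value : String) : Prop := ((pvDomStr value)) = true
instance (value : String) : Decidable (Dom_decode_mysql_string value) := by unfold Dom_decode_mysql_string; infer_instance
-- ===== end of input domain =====

-- B decodes MySQL escapes by splitting on the backslash delimiter and reassembling the
-- segments in one pass, instead of A's manual index-based while loop over the characters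
-- (objective: faster — a timing run measured B faster; same results on every input, both total).

-- ===== PORT A =====
-- the dict literal A builds for .get(escaped, escaped)
def pvEscA (escaped : String) : String :=
  (PySem.Dict.mk [("0", "\x00"), ("b", "\x08"), ("n", "\n"), ("r", "\r"), ("t", "\t"),
                  ("Z", "\x1a"), ("\\", "\\"), ("'", "'"), ("\"", "\"")]).getD escaped escaped

-- A's while loop: i is the index, result the accumulated pieces; value[i] is always
-- guarded by the surrounding bounds test, so the in-range getElem is exact here.
def pvLoopA (cs : List Char) (i : Nat) (result : List String) : List String :=
  if h : i < cs.length then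
    let char := cs[i]
    if char ≠ '\\' then
      pvLoopA cs (i + 1) (result ++ [String.ofList [char]])
    else if h2 : cs.length ≤ i + 1 then
      result ++ ["\\"]
    else
      let escaped := cs[i + 1]'(by omega)
      pvLoopA cs (i + 2) (result ++ [pvEscA (String.ofList [escaped])])
  else result
termination_by cs.length - i

def decode_mysql_string (value : String) : String :=
  PySem.Str.join "" (pvLoopA value.toList 0 [])

-- ===== PORT B =====
-- module-level _MYSQL_ESCAPES dict of Source B
def pvEscB (key : String) : String :=
  (PySem.Dict.mk [("0", "\x00"), ("b", "\x08"), ("n", "\n"), ("r", "\r"), ("t", "\t"),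
                  ("Z", "\x1a"), ("\\", "\\"), ("'", "'"), ("\"", "\"")]).getD key key

-- _MYSQL_ESCAPES.get(p[0], p[0]) + p[1:]  (p known nonempty at the call site)
def pvMapHead (p : String) : String :=
  match p.toList with
  | [] => p
  | c :: rest => pvEscB (String.ofList [c]) ++ String.ofList rest

-- Source B's while loop over the split parts
def pvLoopB (parts : List String) (i : Nat) (out : List String) : List String :=
  if h : i < parts.length then
    let p := parts[i]
    if p ≠ "" then
      pvLoopB parts (i + 1) (out ++ [pvMapHead p])
    else
      pvLoopB parts (i + 2)
        (out ++ ["\\" ++ (if h2 : i + 1 < parts.length then parts[i + 1] else "")])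
  else out
termination_by parts.length - i

def decode_mysql_string_alt (value : String) : String :=
  -- value.split("\\"): Chars.splitOn is PySem's s.split(sep) for a non-empty sep
  let parts := (PySem.Chars.splitOn value.toList ['\\']).map String.ofList
  -- out = [parts[0]]: split always returns a non-empty list, headI is parts[0]
  PySem.Str.join "" (pvLoopB parts 1 [parts.headI])

-- ===== PRECONDITION & SPEC =====
def Spec_decode_mysql_string (value : String) (out : String) : Prop := out = decode_mysql_string_alt value
instance (value : String) (out : String) : Decidable (Spec_decode_mysql_string value out) := by unfold Spec_decode_mysql_string; infer_instance

-- ===== CLAIM (what is proved, stated in full; the proofs are below) =====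
def Claim_equal_decode_mysql_string : Prop := ∀ (value : String), Dom_decode_mysql_string value → Spec_decode_mysql_string value (decode_mysql_string value)

-- ===== LEMMAS AND PROOFS =====

-- canonical decoded character list (reference both directions of the proof meet at)
def pvDec : List Char → List Char
  | [] => []
  | c :: rest =>
    if c = '\\' then
      match rest with
      | [] => ['\\']
      | d :: rest' => (pvEscA (String.ofList [d])).toList ++ pvDec rest'
    else c :: pvDec rest

theorem pvDec_esc (c : Char) (rest : List Char) :
    pvDec ('\\' :: c :: rest) = (pvEscA (String.ofList [c])).toList ++ pvDec rest := by
  rw [pvDec]; simp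

theorem pvDec_bs_bs (rest : List Char) : pvDec ('\\' :: '\\' :: rest) = '\\' :: pvDec rest := by
  rw [pvDec_esc]
  have h : (pvEscA (String.ofList ['\\'])).toList = ['\\'] := by decide
  rw [h]; rfl

theorem pvDec_other {c : Char} (hc : c ≠ '\\') (rest : List Char) :
    pvDec (c :: rest) = c :: pvDec rest := by
  rw [pvDec.eq_def]
  simp only []
  rw [if_neg hc]

-- structural model of value.split('\\') on the char list
def pvSplitF : List Char → List (List Char)
  | [] => [[]]
  | c :: rest =>
    if c = '\\' then [] :: pvSplitF rest
    else
      match pvSplitF rest with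
      | [] => [[c]]
      | p :: ps => (c :: p) :: ps

theorem pvSplitF_ne_nil (cs : List Char) : pvSplitF cs ≠ [] := by
  cases cs with
  | nil => simp [pvSplitF]
  | cons c rest =>
    simp only [pvSplitF]
    split
    · simp
    · split <;> simp

theorem pvSplitF_bs (rest : List Char) : pvSplitF ('\\' :: rest) = [] :: pvSplitF rest := by
  simp [pvSplitF]

theorem pvSplitF_other {c : Char} (hc : c ≠ '\\') {rest p : List Char} {ps : List (List Char)}
    (hsp : pvSplitF rest = p :: ps) : pvSplitF (c :: rest) = (c :: p) :: ps := by
  simp [pvSplitF, hc, hsp]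

theorem pvGo_nil (fuel : Nat) (cur : List Char) (acc : List (List Char)) :
    PySem.Chars.splitOn.go ['\\'] fuel [] cur acc = (cur.reverse :: acc).reverse := by
  cases fuel <;> rw [PySem.Chars.splitOn.go] <;> simp

theorem pvGo_bs (fuel : Nat) (rest cur : List Char) (acc : List (List Char)) :
    PySem.Chars.splitOn.go ['\\'] (fuel + 1) ('\\' :: rest) cur acc
      = PySem.Chars.splitOn.go ['\\'] fuel rest [] (cur.reverse :: acc) := by
  rw [PySem.Chars.splitOn.go]; simp [List.isPrefixOf]

theorem pvGo_other (fuel : Nat) (c : Char) (rest cur : List Char) (acc : List (List Char))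
    (h : c ≠ '\\') :
    PySem.Chars.splitOn.go ['\\'] (fuel + 1) (c :: rest) cur acc
      = PySem.Chars.splitOn.go ['\\'] fuel rest (c :: cur) acc := by
  rw [PySem.Chars.splitOn.go]; simp [List.isPrefixOf, Ne.symm h]

-- prepend to the head part (what go's cur accumulator amounts to)
def pvConsHead (pre : List Char) : List (List Char) → List (List Char)
  | [] => [pre]
  | p :: ps => (pre ++ p) :: ps

theorem pvConsHead_nil_of_ne_nil {l : List (List Char)} (h : l ≠ []) : pvConsHead [] l = l := by
  cases l with
  | nil => exact absurd rfl h
  | cons p ps => simp [pvConsHead]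

theorem pvGo_spec (l : List Char) : ∀ (fuel : Nat) (cur : List Char) (acc : List (List Char)),
    l.length ≤ fuel →
    PySem.Chars.splitOn.go ['\\'] fuel l cur acc
      = acc.reverse ++ pvConsHead cur.reverse (pvSplitF l) := by
  induction l with
  | nil => intro fuel cur acc _; rw [pvGo_nil]; simp [pvSplitF, pvConsHead]
  | cons c rest ih =>
    intro fuel cur acc hf
    cases fuel with
    | zero => simp at hf
    | succ f =>
      by_cases h : c = '\\'
      · subst h
        rw [pvGo_bs, ih f [] _ (by simpa using hf), pvSplitF_bs]
        simp only [List.reverse_nil]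
        rw [pvConsHead_nil_of_ne_nil (pvSplitF_ne_nil rest)]
        simp [pvConsHead]
      · rw [pvGo_other _ _ _ _ _ h, ih f (c :: cur) acc (by simpa using hf)]
        cases hsp : pvSplitF rest with
        | nil => exact absurd hsp (pvSplitF_ne_nil rest)
        | cons p ps => rw [pvSplitF_other h hsp]; simp [pvConsHead]

theorem pvSplitOn_eq (cs : List Char) : PySem.Chars.splitOn cs ['\\'] = pvSplitF cs := by
  rw [PySem.Chars.splitOn, pvGo_spec cs (cs.length + 1) [] [] (by omega)]
  simpa using pvConsHead_nil_of_ne_nil (pvSplitF_ne_nil cs)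

-- the pieces A's loop appends from position i on
def pvSpecA : List Char → List String
  | [] => []
  | c :: rest =>
    if c = '\\' then
      match rest with
      | [] => ["\\"]
      | d :: rest' => pvEscA (String.ofList [d]) :: pvSpecA rest'
    else String.ofList [c] :: pvSpecA rest

theorem pvSpecA_esc (d : Char) (rest : List Char) :
    pvSpecA ('\\' :: d :: rest) = pvEscA (String.ofList [d]) :: pvSpecA rest := by
  rw [pvSpecA]; simp

theorem pvSpecA_other {c : Char} (hc : c ≠ '\\') (rest : List Char) :
    pvSpecA (c :: rest) = String.ofList [c] :: pvSpecA rest := by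
  rw [pvSpecA.eq_def]
  simp only []
  rw [if_neg hc]

theorem pvLoopA_eq (cs : List Char) : ∀ (i : Nat) (result : List String),
    pvLoopA cs i result = result ++ pvSpecA (cs.drop i) := by
  have H : ∀ (n i : Nat) (result : List String), cs.length - i ≤ n →
      pvLoopA cs i result = result ++ pvSpecA (cs.drop i) := by
    intro n
    induction n with
    | zero =>
      intro i result h
      rw [pvLoopA]
      have hge : ¬ i < cs.length := by omega
      have hdrop : cs.drop i = [] := List.drop_eq_nil_of_le (by omega)
      simp [hge, hdrop, pvSpecA]
    | succ n ih =>
      intro i result h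
      rw [pvLoopA]
      by_cases hlt : i < cs.length
      · have hdrop : cs.drop i = cs[i] :: cs.drop (i + 1) := List.drop_eq_getElem_cons hlt
        by_cases hc : cs[i] = '\\'
        · by_cases h2 : cs.length ≤ i + 1
          · have hdrop1 : cs.drop (i + 1) = [] := List.drop_eq_nil_of_le h2
            rw [dif_pos hlt]
            simp only [hc, ne_eq, not_true_eq_false, if_false, dif_pos h2, hdrop, hdrop1]
            simp [pvSpecA]
          · have hdrop1 : cs.drop (i + 1) = cs[i + 1]'(by omega) :: cs.drop (i + 2) :=
              List.drop_eq_getElem_cons (by omega)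
            rw [dif_pos hlt]
            simp only [hc, ne_eq, not_true_eq_false, if_false, dif_neg h2]
            rw [ih (i + 2) _ (by omega), hdrop, hdrop1, hc, pvSpecA_esc]
            simp
        · rw [dif_pos hlt, if_pos (by simpa using hc), ih (i + 1) _ (by omega), hdrop,
            pvSpecA_other hc]
          simp
      · have hdrop : cs.drop i = [] := List.drop_eq_nil_of_le (by omega)
        simp [hlt, hdrop, pvSpecA]
  intro i result
  exact H (cs.length - i) i result (by omega)

-- the pieces B's loop appends from part index i on (i ≥ 1: every part opens an escape)
def pvSpecB : List String → List String
  | [] => []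
  | p :: rest =>
    if p = "" then
      match rest with
      | [] => ["\\"]
      | q :: rest' => ("\\" ++ q) :: pvSpecB rest'
    else pvMapHead p :: pvSpecB rest

theorem pvSpecB_other {p : String} (hp : p ≠ "") (rest : List String) :
    pvSpecB (p :: rest) = pvMapHead p :: pvSpecB rest := by
  rw [pvSpecB.eq_def]
  simp only []
  rw [if_neg hp]

theorem pvLoopB_eq (parts : List String) : ∀ (i : Nat) (out : List String),
    pvLoopB parts i out = out ++ pvSpecB (parts.drop i) := by
  have H : ∀ (n i : Nat) (out : List String), parts.length - i ≤ n →
      pvLoopB parts i out = out ++ pvSpecB (parts.drop i) := by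
    intro n
    induction n with
    | zero =>
      intro i out h
      rw [pvLoopB]
      have hge : ¬ i < parts.length := by omega
      have hdrop : parts.drop i = [] := List.drop_eq_nil_of_le (by omega)
      simp [hge, hdrop, pvSpecB]
    | succ n ih =>
      intro i out h
      rw [pvLoopB]
      by_cases hlt : i < parts.length
      · have hdrop : parts.drop i = parts[i] :: parts.drop (i + 1) := List.drop_eq_getElem_cons hlt
        by_cases hp : parts[i] = ""
        · rw [dif_pos hlt]
          simp only [hp, ne_eq, not_true_eq_false, if_false]
          rw [ih (i + 2) _ (by omega), hdrop]
          by_cases h2 : i + 1 < parts.length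
          · have hdrop1 : parts.drop (i + 1) = parts[i + 1] :: parts.drop (i + 2) :=
              List.drop_eq_getElem_cons h2
            rw [hdrop1]
            simp [pvSpecB, hp, h2]
          · have hdrop1 : parts.drop (i + 1) = [] := List.drop_eq_nil_of_le (by omega)
            have hdrop2 : parts.drop (i + 2) = [] := List.drop_eq_nil_of_le (by omega)
            rw [hdrop1, hdrop2]
            simp [pvSpecB, hp, h2]
        · rw [dif_pos hlt, if_pos (by simpa using hp), ih (i + 1) _ (by omega), hdrop,
            pvSpecB_other hp]
          simp
      · have hdrop : parts.drop i = [] := List.drop_eq_nil_of_le (by omega)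
        simp [hlt, hdrop, pvSpecB]
  intro i out
  exact H (parts.length - i) i out (by omega)

-- flattened character output of B's reassembly of a parts suffix
def pvFlatB (ps : List (List Char)) : List Char :=
  ((pvSpecB (ps.map String.ofList)).map String.toList).flatten

theorem pvFlatB_nil_nil : pvFlatB [[]] = ['\\'] := by
  simp [pvFlatB, pvSpecB]

theorem pvFlatB_nil_cons (p : List Char) (ps : List (List Char)) :
    pvFlatB ([] :: p :: ps) = '\\' :: (p ++ pvFlatB ps) := by
  simp [pvFlatB, pvSpecB, String.toList_append]

theorem pvFlatB_cons (c : Char) (p : List Char) (ps : List (List Char)) :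
    pvFlatB ((c :: p) :: ps) = (pvEscA (String.ofList [c])).toList ++ (p ++ pvFlatB ps) := by
  have hne : String.ofList (c :: p) ≠ "" := by simp [String.ext_iff]
  unfold pvFlatB
  simp only [List.map_cons]
  rw [pvSpecB.eq_def]
  simp only []
  rw [if_neg hne]
  have hBA : pvEscB (String.ofList [c]) = pvEscA (String.ofList [c]) := rfl
  simp [pvMapHead, hBA, String.toList_append]

theorem pvJoin_empty_toList (l : List String) :
    (PySem.Str.join "" l).toList = (l.map String.toList).flatten := by
  have h : ∀ (m : List (List Char)), PySem.Chars.join [] m = m.flatten := by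
    intro m
    induction m with
    | nil => simp [PySem.Chars.join, List.intercalate]
    | cons a t ih =>
      cases t with
      | nil => simp [PySem.Chars.join, List.intercalate]
      | cons b t2 =>
        simp [PySem.Chars.join, List.intercalate] at ih ⊢
        simpa using ih
  simp [h]

theorem pvFlatA (cs : List Char) : ((pvSpecA cs).map String.toList).flatten = pvDec cs := by
  have H : ∀ (n : Nat) (cs : List Char), cs.length ≤ n →
      ((pvSpecA cs).map String.toList).flatten = pvDec cs := by
    intro n
    induction n with
    | zero =>
      intro cs h
      have hnil : cs = [] := List.length_eq_zero_iff.mp (by omega)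
      subst hnil
      simp [pvSpecA, pvDec]
    | succ n ih =>
      intro cs h
      cases cs with
      | nil => simp [pvSpecA, pvDec]
      | cons c rest =>
        by_cases hc : c = '\\'
        · subst hc
          cases rest with
          | nil => simp [pvSpecA, pvDec]
          | cons d rest' =>
            rw [pvDec_esc, pvSpecA_esc]
            simp only [List.map_cons, List.flatten_cons]
            rw [ih rest' (by simp at h; omega)]
        · rw [pvSpecA_other hc, pvDec_other hc]
          simp only [List.map_cons, List.flatten_cons]
          rw [ih rest (by simp at h; omega)]
          simp
  exact H cs.length cs le_rfl

-- L1/L2: splitting then reassembling produces the canonical decoding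
theorem pvBridge : ∀ (cs : List Char),
    ((pvSplitF cs).headI ++ pvFlatB (pvSplitF cs).tail = pvDec cs)
    ∧ (pvFlatB (pvSplitF cs) = pvDec ('\\' :: cs)) := by
  intro cs
  induction cs with
  | nil =>
    constructor
    · simp [pvSplitF, pvFlatB, pvSpecB, pvDec]
    · rw [pvSplitF, pvFlatB_nil_nil]; rfl
  | cons c rest ih =>
    obtain ⟨ih1, ih2⟩ := ih
    by_cases hc : c = '\\'
    · subst hc
      constructor
      · simpa [pvSplitF_bs] using ih2
      · cases hsp : pvSplitF rest with
        | nil => exact absurd hsp (pvSplitF_ne_nil rest)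
        | cons p ps =>
          rw [pvSplitF_bs, hsp, pvFlatB_nil_cons, pvDec_bs_bs]
          have hih : p ++ pvFlatB ps = pvDec rest := by
            have h1 := ih1; rw [hsp] at h1
            simpa using h1
          rw [hih]
    · cases hsp : pvSplitF rest with
      | nil => exact absurd hsp (pvSplitF_ne_nil rest)
      | cons p ps =>
        have hsplit : pvSplitF (c :: rest) = (c :: p) :: ps := pvSplitF_other hc hsp
        have hih1 : p ++ pvFlatB ps = pvDec rest := by
          have h1 := ih1; rw [hsp] at h1
          simpa using h1
        constructor
        · rw [hsplit, pvDec_other hc]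
          simp only [List.headI, List.tail]
          rw [← hih1]
          simp
        · rw [hsplit, pvFlatB_cons, pvDec_esc, hih1]
  -- ===== VERDICT continues below =====

-- ===== VERDICT (by name: the statement is the Claim_ definition above) =====
theorem decode_mysql_string_spec : Claim_equal_decode_mysql_string := by
  intro value _
  unfold Spec_decode_mysql_string
  apply String.toList_inj.mp
  rw [decode_mysql_string, decode_mysql_string_alt]
  simp only [pvSplitOn_eq]
  rw [pvLoopA_eq, pvLoopB_eq]
  simp only [List.drop_zero, List.nil_append]
  rw [pvJoin_empty_toList, pvJoin_empty_toList, pvFlatA]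
  cases hsp : pvSplitF value.toList with
  | nil => exact absurd hsp (pvSplitF_ne_nil value.toList)
  | cons p ps =>
    obtain ⟨h1, _⟩ := pvBridge value.toList
    rw [hsp] at h1
    simp only [List.headI, List.tail] at h1
    rw [← h1]
    simp [pvFlatB]
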